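-- pv_equiv track=rewrite | github.com/Andres1911/Advent-of-Code | solution_3.py | find_largest_joltage
-- ===== SOURCE A (Python) =====
-- def find_largest_joltage(n: str) -> int:
--     first, second = '0', '0'
--     for i, num in enumerate(n):
--         if int(num) > int(first) and i != len(n) - 1:
--             first = num
--             second = '0'
--
--         elif int(num) > int(second):
--             second = num
--
--     return int(first + second)
-- ===== SOURCE B (Python) =====
-- def find_largest_joltage(n: str) -> int:
--     d = [int(c) for c in n]
--     head = d[:-1]
--     M = max(head) if head else 0
--     p = head.index(M) if M > 0 else -1
--     tail = d[p + 1:]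
--     second = max(tail) if tail else 0
--     return M * 10 + second
-- ===== Notes on version B (the rewrite author's own statement) =====
-- stated objective: simpler
-- what changed: A's single greedy scan with coupled state (running first-digit plus a second accumulator that resets on every new prefix maximum) is replaced by two independent phases: take the maximum of the digits before the last position and its first index, then take the maximum of the digits after that index.
import Mathlib
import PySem

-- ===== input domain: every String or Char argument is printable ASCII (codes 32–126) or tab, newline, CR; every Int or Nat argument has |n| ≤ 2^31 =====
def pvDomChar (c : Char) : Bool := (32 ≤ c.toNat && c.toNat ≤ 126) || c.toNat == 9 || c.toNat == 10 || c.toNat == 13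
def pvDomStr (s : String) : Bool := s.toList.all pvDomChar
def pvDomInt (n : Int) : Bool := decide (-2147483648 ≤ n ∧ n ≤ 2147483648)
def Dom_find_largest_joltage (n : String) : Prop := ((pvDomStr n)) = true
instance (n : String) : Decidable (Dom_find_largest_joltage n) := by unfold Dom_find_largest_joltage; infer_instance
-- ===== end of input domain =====

-- B replaces A's single coupled greedy scan by two explicit phases (prefix maximum + its first
-- position, then suffix maximum after it); objective: simpler.

-- ===== PORT A =====
-- int(c) for a single character; none = ValueError on a non-digit, excluded by Pre_
def pyIntChar (c : Char) : Int := (PySem.Int.ofChars? [c]).getD 0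

-- the body of A's `for i, num in enumerate(n)` loop (N = len(n))
def stepA (N : Int) (fs : Char × Char) (ic : Int × Char) : Char × Char :=
  if pyIntChar ic.2 > pyIntChar fs.1 ∧ ic.1 ≠ N - 1 then (ic.2, '0')
  else if pyIntChar ic.2 > pyIntChar fs.2 then (fs.1, ic.2)
  else fs

def find_largest_joltage (n : String) : Int :=
  let st := (PySem.List.enumerate n.toList).foldl (stepA (PySem.Str.len n)) ('0', '0')
  (PySem.Int.ofChars? [st.1, st.2]).getD 0   -- int(first + second)

-- ===== PORT B =====
def find_largest_joltage_alt (n : String) : Int :=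
  let d := n.toList.map pyIntChar   -- [int(c) for c in n]; shared digit-conversion helper
  let head := PySem.List.slice d none (some (-1))            -- d[:-1]
  let M : Int := if head.isEmpty then 0 else (PySem.List.max? head (fun x => x)).getD 0
  -- head.index(M): when M > 0 it occurs in head, so index? is some there
  let p : Int := if M > 0 then ((PySem.List.index? head M).getD 0 : Nat) else -1
  let tail := PySem.List.slice d (some (p + 1)) none         -- d[p+1:]
  let second : Int := if tail.isEmpty then 0 else (PySem.List.max? tail (fun x => x)).getD 0
  M * 10 + second

-- ===== PRECONDITION & SPEC =====
-- Pre_ excludes exactly the strings containing a non-digit character, on which Python's int(num) raises ValueError.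
def Pre_find_largest_joltage (n : String) : Prop := n.toList.all (fun c => '0' ≤ c && c ≤ '9') = true
instance (n : String) : Decidable (Pre_find_largest_joltage n) := by unfold Pre_find_largest_joltage; infer_instance
def pvWitness_find_largest_joltage : String := "928"

def Spec_find_largest_joltage (n : String) (out : Int) : Prop := out = find_largest_joltage_alt n
instance (n : String) (out : Int) : Decidable (Spec_find_largest_joltage n out) := by unfold Spec_find_largest_joltage; infer_instance

-- ===== CLAIM (what is proved, stated in full; the proofs are below) =====
def Claim_equal_find_largest_joltage : Prop := ∀ (n : String), Dom_find_largest_joltage n → Pre_find_largest_joltage n → Spec_find_largest_joltage n (find_largest_joltage n)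

-- ===== LEMMAS AND PROOFS =====

/-- `c` is a decimal digit character. -/
def IsDig (c : Char) : Prop := '0' ≤ c ∧ c ≤ '9'

lemma isDig_cases {c : Char} (h : IsDig c) :
    c = '0' ∨ c = '1' ∨ c = '2' ∨ c = '3' ∨ c = '4' ∨ c = '5' ∨ c = '6' ∨ c = '7' ∨
      c = '8' ∨ c = '9' := by
  obtain ⟨h1, h2⟩ := h
  have a1 : 48 ≤ c.toNat := h1
  have a2 : c.toNat ≤ 57 := h2
  rw [← Char.ofNat_toNat c]
  interval_cases c.toNat <;> decide

lemma pyIntChar_nonneg {c : Char} (h : IsDig c) : 0 ≤ pyIntChar c := by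
  rcases isDig_cases h with h | h | h | h | h | h | h | h | h | h <;> subst h <;> decide

lemma int2_digit {f s : Char} (hf : IsDig f) (hs : IsDig s) :
    (PySem.Int.ofChars? [f, s]).getD 0 = 10 * pyIntChar f + pyIntChar s := by
  rcases isDig_cases hf with h | h | h | h | h | h | h | h | h | h <;> subst h <;>
    (rcases isDig_cases hs with h | h | h | h | h | h | h | h | h | h <;> subst h <;> decide)

/-- The numeric step of A's loop on a non-final position. -/
def gnum (st : Int × Int) (v : Int) : Int × Int :=
  if v > st.1 then (v, 0) else if v > st.2 then (st.1, v) else st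

/-- `max(l)` with default 0 (value of Python `max(l) if l else 0`). -/
def mnum (l : List Int) : Int := (PySem.List.max? l (fun x => x)).getD 0

lemma mnum_eq_foldl {l : List Int} (h : ∀ v ∈ l, 0 ≤ v) :
    mnum l = l.foldl max 0 := by
  cases l with
  | nil => simp [mnum, PySem.List.max?]
  | cons x t =>
    have hx : 0 ≤ x := h x (List.mem_cons_self ..)
    simp [mnum, PySem.List.max?_id_cons, List.foldl_cons, max_eq_right hx]

lemma mnum_append_singleton {u : List Int} {x : Int} (hu : ∀ v ∈ u, 0 ≤ v) (hx : 0 ≤ x) :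
    mnum (u ++ [x]) = max (mnum u) x := by
  have h' : ∀ v ∈ u ++ [x], 0 ≤ v := by
    intro v hv; rcases List.mem_append.1 hv with h | h
    · exact hu v h
    · simp at h; omega
  rw [mnum_eq_foldl h', mnum_eq_foldl hu, List.foldl_append]
  simp

/-- Characterisation of A's head loop: running max, and max after the first occurrence of the max. -/
lemma gnum_spec (t : List Int) (F S : Int) (hnn : ∀ v ∈ t, 0 ≤ v) :
    t.foldl gnum (F, S) =
      (t.foldl max F,
       if F < t.foldl max F then mnum (t.drop (t.idxOf (t.foldl max F) + 1))
       else t.foldl max S) := by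
  induction t generalizing F S with
  | nil => simp
  | cons v t ih =>
    have hv : 0 ≤ v := hnn v (List.mem_cons_self ..)
    have hnn' : ∀ w ∈ t, 0 ≤ w := fun w hw => hnn w (List.mem_cons_of_mem _ hw)
    by_cases h1 : v > F
    · -- first := v, second := 0
      have hstep : (v :: t).foldl gnum (F, S) = t.foldl gnum (v, 0) := by
        simp [gnum, h1]
      rw [hstep, ih v 0 hnn']
      have hmax : (v :: t).foldl max F = t.foldl max v := by
        rw [List.foldl_cons, max_eq_right (le_of_lt h1)]
      rw [hmax]
      have hF : F < t.foldl max v := lt_of_lt_of_le h1 (PySem.List.le_foldl_max t v).1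
      by_cases h2 : v < t.foldl max v
      · -- max lies in t; its first index in v::t is one more
        have hmem : t.foldl max v ∈ t := by
          rcases PySem.List.foldl_max_mem t v with h | h
          · omega
          · exact h
        have hne : v ≠ t.foldl max v := by omega
        rw [if_pos h2, if_pos hF, List.idxOf_cons_ne _ (by exact_mod_cast hne)]
        simp
      · -- the max is v itself, at index 0
        have hvm : t.foldl max v = v := by
          have := (PySem.List.le_foldl_max t v).1; omega
        rw [if_neg h2, if_pos hF, hvm, List.idxOf_cons_self]
        simp [mnum_eq_foldl hnn']
    · -- second := max second v (as an if)
      have hstep : (v :: t).foldl gnum (F, S) =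
          t.foldl gnum (F, if v > S then v else S) := by
        by_cases h2 : v > S <;> simp [gnum, h1, h2]
      rw [hstep, ih _ _ hnn']
      have hmax : (v :: t).foldl max F = t.foldl max F := by
        rw [List.foldl_cons, max_eq_left (by omega)]
      rw [hmax]
      by_cases h3 : F < t.foldl max F
      · have hne : v ≠ t.foldl max F := by omega
        rw [if_pos h3, if_pos h3, List.idxOf_cons_ne _ (by exact_mod_cast hne)]
        simp
      · have hSv : (v :: t).foldl max S = t.foldl max (if v > S then v else S) := by
          rw [List.foldl_cons]
          congr 1
          by_cases h : v > S
          · rw [if_pos h, max_eq_right (le_of_lt h)]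
          · rw [if_neg h, max_eq_left (by omega)]
        rw [if_neg h3, if_neg h3, hSv]

lemma enumerate_append_singleton {α : Type} (u : List α) (x : α) (k : Int) :
    PySem.List.enumerate (u ++ [x]) k =
      PySem.List.enumerate u k ++ [(k + u.length, x)] := by
  induction u generalizing k with
  | nil => simp [PySem.List.enumerate]
  | cons y t ih =>
    simp only [List.cons_append, PySem.List.enumerate, ih (k + 1), List.length_cons]
    have he : k + 1 + (t.length : Int) = k + ((t.length + 1 : Nat) : Int) := by push_cast; ring
    rw [he]

lemma enumerate_fst_bounds {α : Type} {l : List α} {k i : Int} {v : α}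
    (h : (i, v) ∈ PySem.List.enumerate l k) : k ≤ i ∧ i < k + l.length := by
  induction l generalizing k with
  | nil => simp [PySem.List.enumerate] at h
  | cons x t ih =>
    simp only [PySem.List.enumerate, List.mem_cons] at h
    rcases h with h | h
    · rw [Prod.ext_iff] at h
      obtain ⟨h1, -⟩ := h
      simp only [List.length_cons]
      push_cast
      omega
    · have := ih h
      simp only [List.length_cons]
      push_cast
      omega

/-- Under Pre_, A's char-level head fold tracks the numeric fold `gnum` and keeps digit states. -/
lemma char_fold_num (N : Int) (l : List (Int × Char)) (f s : Char)
    (hl : ∀ ic ∈ l, IsDig ic.2) (hidx : ∀ ic ∈ l, ic.1 ≠ N - 1)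
    (hf : IsDig f) (hs : IsDig s) :
    IsDig (l.foldl (stepA N) (f, s)).1 ∧ IsDig (l.foldl (stepA N) (f, s)).2 ∧
      (pyIntChar (l.foldl (stepA N) (f, s)).1, pyIntChar (l.foldl (stepA N) (f, s)).2) =
        (l.map (fun ic => pyIntChar ic.2)).foldl gnum (pyIntChar f, pyIntChar s) := by
  induction l generalizing f s with
  | nil => exact ⟨hf, hs, rfl⟩
  | cons ic t ih =>
    have hic : IsDig ic.2 := hl ic (List.mem_cons_self ..)
    have ht : ∀ jc ∈ t, IsDig jc.2 := fun jc hj => hl jc (List.mem_cons_of_mem _ hj)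
    have htidx : ∀ jc ∈ t, jc.1 ≠ N - 1 := fun jc hj => hidx jc (List.mem_cons_of_mem _ hj)
    have hne : ic.1 ≠ N - 1 := hidx ic (List.mem_cons_self ..)
    have h0 : pyIntChar '0' = 0 := by decide
    simp only [List.foldl_cons, List.map_cons]
    by_cases h1 : pyIntChar ic.2 > pyIntChar f
    · have hA : stepA N (f, s) ic = (ic.2, '0') := by
        simp [stepA, h1, hne]
      have hg : gnum (pyIntChar f, pyIntChar s) (pyIntChar ic.2) = (pyIntChar ic.2, 0) := by
        simp [gnum, h1]
      rw [hA, hg]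
      have := ih ic.2 '0' ht htidx hic ⟨by decide, by decide⟩
      rwa [h0] at this
    · have hA : stepA N (f, s) ic =
          (if pyIntChar ic.2 > pyIntChar s then (f, ic.2) else (f, s)) := by
        simp [stepA, h1]
      have hg : gnum (pyIntChar f, pyIntChar s) (pyIntChar ic.2) =
          (if pyIntChar ic.2 > pyIntChar s then (pyIntChar f, pyIntChar ic.2)
           else (pyIntChar f, pyIntChar s)) := by
        simp [gnum, h1]
      rw [hA, hg]
      by_cases h2 : pyIntChar ic.2 > pyIntChar s
      · rw [if_pos h2, if_pos h2]
        exact ih f ic.2 ht htidx hf hic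
      · rw [if_neg h2, if_neg h2]
        exact ih f s ht htidx hf hs


lemma idxOf?_getD_of_mem {l : List Int} {a : Int} (h : a ∈ l) :
    (List.idxOf? a l).getD 0 = l.idxOf a := by
  induction l with
  | nil => simp at h
  | cons x t ih =>
    by_cases hx : x = a
    · subst hx; simp [List.idxOf?_cons, List.idxOf_cons_self]
    · have ha : a ∈ t := by
        rcases List.mem_cons.1 h with h | h
        · exact absurd h.symm hx
        · exact h
      have hne : (x == a) = false := by simp [hx]
      simp only [List.idxOf?_cons, List.idxOf_cons, hne, cond_false]
      rw [← ih ha]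
      cases hio : List.idxOf? a t with
      | none => exact absurd (List.idxOf?_eq_none_iff.1 hio) (by simpa using ha)
      | some i => simp

lemma enumerate_map_val {α β : Type} (f : α → β) (l : List α) (k : Int) :
    (PySem.List.enumerate l k).map (fun ic => f ic.2) = l.map f := by
  induction l generalizing k with
  | nil => simp [PySem.List.enumerate]
  | cons x t ih => simp [PySem.List.enumerate, ih]

lemma enumerate_snd_mem {α : Type} {l : List α} {k : Int} {ic : Int × α}
    (h : ic ∈ PySem.List.enumerate l k) : ic.2 ∈ l := by
  induction l generalizing k with
  | nil => simp [PySem.List.enumerate] at h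
  | cons x t ih =>
    simp only [PySem.List.enumerate, List.mem_cons] at h
    rcases h with h | h
    · subst h; simp
    · exact List.mem_cons_of_mem _ (ih h)

lemma max_ite (a b : Int) : max a b = if b > a then b else a := by
  by_cases h : b > a
  · rw [if_pos h, max_eq_right (le_of_lt h)]
  · rw [if_neg h, max_eq_left (by omega)]

-- ===== VERDICT (by name: the statement is the Claim_ definition above) =====
theorem find_largest_joltage_spec : Claim_equal_find_largest_joltage := by
  intro n _ hpre
  unfold Spec_find_largest_joltage
  have hdig : ∀ c ∈ n.toList, IsDig c := by
    intro c hc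
    have h := (List.all_eq_true.mp hpre) c hc
    simp only [Bool.and_eq_true, decide_eq_true_eq] at h
    exact h
  rcases List.eq_nil_or_concat n.toList with hcs | ⟨u, x, hcs⟩
  · -- empty string: both return 0
    simp only [find_largest_joltage, find_largest_joltage_alt, hcs]
    simp [PySem.List.enumerate]
    decide
  · rw [List.concat_eq_append] at hcs
    have hx : IsDig x := hdig x (by rw [hcs]; simp)
    have hu : ∀ c ∈ u, IsDig c := fun c hc => hdig c (by rw [hcs]; simp [hc])
    have hN : PySem.Str.len n = (u.length : Int) + 1 := by
      rw [PySem.Str.len_eq, hcs]; simp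
    set N := PySem.Str.len n with hNdef
    -- ---- A side ----
    have henum : PySem.List.enumerate n.toList 0 =
        PySem.List.enumerate u 0 ++ [((u.length : Int), x)] := by
      rw [hcs, enumerate_append_singleton]; norm_num
    have hl : ∀ ic ∈ PySem.List.enumerate u 0, IsDig ic.2 :=
      fun ic hic => hu ic.2 (enumerate_snd_mem hic)
    have hidx : ∀ ic ∈ PySem.List.enumerate u 0, ic.1 ≠ N - 1 := by
      intro ic hic
      obtain ⟨h1, h2⟩ := enumerate_fst_bounds (l := u) (k := 0)
        (show (ic.1, ic.2) ∈ _ by simpa using hic)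
      rw [hN]; omega
    obtain ⟨hd1, hd2, hnum⟩ := char_fold_num N (PySem.List.enumerate u 0) '0' '0'
      hl hidx ⟨by decide, by decide⟩ ⟨by decide, by decide⟩
    set r := (PySem.List.enumerate u 0).foldl (stepA N) ('0', '0') with hr
    set U := u.map pyIntChar with hU
    rw [enumerate_map_val] at hnum
    have h00 : (pyIntChar '0', pyIntChar '0') = ((0 : Int), (0 : Int)) := by decide
    rw [h00] at hnum
    have hnnU : ∀ v ∈ U, 0 ≤ v := by
      intro v hv
      obtain ⟨c, hc, rfl⟩ := List.mem_map.1 hv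
      exact pyIntChar_nonneg (hu c hc)
    rw [gnum_spec U 0 0 hnnU] at hnum
    set M0 := U.foldl max 0 with hM0
    have hM0nn : 0 ≤ M0 := (PySem.List.le_foldl_max U 0).1
    have hF : pyIntChar r.1 = M0 := congrArg Prod.fst hnum
    have hS : pyIntChar r.2 =
        (if (0 : Int) < M0 then mnum (U.drop (U.idxOf M0 + 1)) else U.foldl max 0) :=
      congrArg Prod.snd hnum
    set vx := pyIntChar x with hvx
    have hvxnn : 0 ≤ vx := pyIntChar_nonneg hx
    have hst : (PySem.List.enumerate n.toList 0).foldl (stepA N) ('0', '0') =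
        stepA N r ((u.length : Int), x) := by
      rw [henum, List.foldl_append, List.foldl_cons, List.foldl_nil]
    have hstep : stepA N r ((u.length : Int), x) =
        if vx > pyIntChar r.2 then (r.1, x) else r := by
      rw [stepA, if_neg (by intro h; exact h.2 (by rw [hN]; push_cast; ring))]
    have hAval : find_largest_joltage n = 10 * M0 + max (pyIntChar r.2) vx := by
      simp only [find_largest_joltage, ← hNdef, hst, hstep]
      rw [max_ite]
      by_cases h2 : vx > pyIntChar r.2
      · rw [if_pos h2, if_pos h2]
        rw [int2_digit hd1 hx, hF]
      · rw [if_neg h2, if_neg h2]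
        rw [int2_digit hd1 hd2, hF]
    -- ---- B side ----
    have hd' : n.toList.map pyIntChar = U ++ [vx] := by
      rw [hcs, List.map_append, List.map_singleton]
    have hheadM : (if (PySem.List.slice (U ++ [vx]) none (some (-1)) : List Int).isEmpty = true then (0:Int)
        else (PySem.List.max? (PySem.List.slice (U ++ [vx]) none (some (-1))) (fun x => x)).getD 0) = M0 := by
      rw [PySem.List.slice_to_neg_one, List.dropLast_concat]
      by_cases hUe : U.isEmpty
      · rw [if_pos hUe]
        have hUnil : U = [] := List.isEmpty_iff.1 hUe
        rw [hM0, hUnil]; rfl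
      · rw [if_neg hUe]
        rw [hM0]
        exact mnum_eq_foldl hnnU
    rw [hAval]
    simp only [find_largest_joltage_alt, hd', hheadM]
    rw [PySem.List.slice_to_neg_one, List.dropLast_concat]
    by_cases hpos : M0 > 0
    · -- the prefix max is positive: B takes the suffix after its first occurrence
      have hmem : M0 ∈ U := by
        rcases PySem.List.foldl_max_mem U 0 with h | h
        · omega
        · exact h
      have hq : ((PySem.List.index? U M0).getD 0 : Nat) = U.idxOf M0 := by
        rw [PySem.List.index?_eq_idxOf?, idxOf?_getD_of_mem hmem]
      rw [if_pos hpos, hq]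
      have hqlt : U.idxOf M0 < U.length := List.idxOf_lt_length_of_mem hmem
      have hcast : (U.idxOf M0 : Int) + 1 = ((U.idxOf M0 + 1 : Nat) : Int) := by push_cast; ring
      rw [hcast, PySem.List.slice_from_natCast,
        List.drop_append_of_le_length (by omega)]
      have hne : ((U.drop (U.idxOf M0 + 1) ++ [vx] : List Int).isEmpty) = false := by simp
      rw [hne]
      simp only [Bool.false_eq_true, if_false]
      have hdnn : ∀ v ∈ U.drop (U.idxOf M0 + 1), 0 ≤ v :=
        fun v hv => hnnU v (List.mem_of_mem_drop hv)
      have : (PySem.List.max? (U.drop (U.idxOf M0 + 1) ++ [vx]) (fun x => x)).getD 0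
          = max (mnum (U.drop (U.idxOf M0 + 1))) vx := mnum_append_singleton hdnn hvxnn
      rw [this, hS, if_pos hpos]
      ring
    · -- the prefix max is 0: the suffix is the whole list
      have hM00 : M0 = 0 := by omega
      rw [if_neg hpos]
      have h01 : (-1 : Int) + 1 = ((0 : Nat) : Int) := by norm_num
      rw [h01, PySem.List.slice_from_natCast, List.drop_zero]
      have hne : ((U ++ [vx] : List Int).isEmpty) = false := by simp
      rw [hne]
      simp only [Bool.false_eq_true, if_false]
      have : (PySem.List.max? (U ++ [vx]) (fun x => x)).getD 0 = max (mnum U) vx :=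
        mnum_append_singleton hnnU hvxnn
      rw [this]
      have hmU : mnum U = 0 := by rw [mnum_eq_foldl hnnU, ← hM0, hM00]
      rw [hS, if_neg hpos, ← hM0, hM00, hmU]
      simp [max_eq_right hvxnn]
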